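-- pv_equiv track=rewrite | github.com/little-isaac/scaler | intermediate/day_24/hw_time_to_equality.py | solve
-- ===== SOURCE A (Python) =====
-- def solve(A):
--     total_sum = 0
--     maximumEle = A[0]
--     n = len(A)
--     for ele in A:
--         total_sum = total_sum + ele
--         if maximumEle < ele:
--             maximumEle = ele
--     maxSum = n * maximumEle
--     return maxSum - total_sum
-- ===== SOURCE B (Python) =====
-- def solve(A):
--     # Online repair: maintain the answer for the prefix seen so far.
--     # When a new maximum x arrives after i elements, every earlier element's
--     # deficit grows by (x - m), so the running answer is repaired by i*(x-m);
--     # otherwise the new element just contributes its own deficit m - x.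
--     m = A[0]
--     ops = 0
--     for i, x in enumerate(A):
--         if m < x:
--             ops += i * (x - m)
--             m = x
--         else:
--             ops += m - x
--     return ops
-- ===== Notes on version B (the rewrite author's own statement) =====
-- stated objective: alternative
-- what changed: Replaces A's two-quantity pass (accumulate sum and max, then compute n*max-sum at the end) by an online incremental-repair algorithm that maintains the answer itself: each non-record element adds its deficit m-x, and each new maximum x after i elements repairs the running answer by i*(x-m); no sum or final formula is ever computed.
import Mathlib
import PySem

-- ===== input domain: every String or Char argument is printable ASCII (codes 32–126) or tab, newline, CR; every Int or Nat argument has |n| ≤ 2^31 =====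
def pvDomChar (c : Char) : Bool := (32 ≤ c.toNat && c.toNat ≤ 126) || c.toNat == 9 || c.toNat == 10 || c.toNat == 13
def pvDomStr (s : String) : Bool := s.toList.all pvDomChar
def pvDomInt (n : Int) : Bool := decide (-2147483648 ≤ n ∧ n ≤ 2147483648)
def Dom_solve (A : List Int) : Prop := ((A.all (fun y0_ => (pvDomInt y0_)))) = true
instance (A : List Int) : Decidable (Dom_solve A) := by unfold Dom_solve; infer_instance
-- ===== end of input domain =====

-- B replaces A's sum+max pass followed by the n*max-sum formula with an online
-- incremental-repair pass that maintains the answer itself; objective: alternative.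

-- ===== PORT A =====
def solve (A : List Int) : Int :=
  match PySem.List.pyGet? A 0 with
  | none => 0   -- A[0] raises IndexError on []; excluded by Pre_solve
  | some m0 =>
    let st := A.foldl (fun (p : Int × Int) ele => (p.1 + ele, if p.2 < ele then ele else p.2)) (0, m0)
    (A.length : Int) * st.2 - st.1

-- ===== PORT B =====
def solve_alt (A : List Int) : Int :=
  match PySem.List.pyGet? A 0 with
  | none => 0   -- A[0] raises IndexError on []; excluded by Pre_solve
  | some m0 =>
    ((PySem.List.enumerate A 0).foldl
      (fun (st : Int × Int) p =>
        if st.1 < p.2 then (p.2, st.2 + p.1 * (p.2 - st.1))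
        else (st.1, st.2 + (st.1 - p.2))) (m0, 0)).2

-- ===== PRECONDITION & SPEC =====
-- Pre_ excludes only the empty list, on which both A and B raise IndexError at A[0].
def Pre_solve (A : List Int) : Prop := A ≠ []
instance (A : List Int) : Decidable (Pre_solve A) := by unfold Pre_solve; infer_instance
def pvWitness_solve : List Int := ([1, 3, 2])

def Spec_solve (A : List Int) (out : Int) : Prop := out = solve_alt A
instance (A : List Int) (out : Int) : Decidable (Spec_solve A out) := by unfold Spec_solve; infer_instance

-- ===== CLAIM =====
def Claim_equal_solve : Prop := ∀ (A : List Int), Dom_solve A → Pre_solve A → Spec_solve A (solve A)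

-- ===== LEMMAS AND PROOFS =====
lemma pairFold (l : List Int) : ∀ s m : Int,
    l.foldl (fun (p : Int × Int) ele => (p.1 + ele, if p.2 < ele then ele else p.2)) (s, m)
      = (s + l.sum, l.foldl (fun acc ele => if acc < ele then ele else acc) m) := by
  induction l with
  | nil => intro s m; simp
  | cons a t ih =>
    intro s m
    simp only [List.foldl_cons, List.sum_cons, ih]
    rw [Prod.mk.injEq]
    exact ⟨by ring, rfl⟩

-- the loop invariant of B: the running answer equals (elements seen)*max - sum seen
lemma repairFold (l : List Int) : ∀ (k m ops : Int),
    ((PySem.List.enumerate l k).foldl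
      (fun (st : Int × Int) p =>
        if st.1 < p.2 then (p.2, st.2 + p.1 * (p.2 - st.1))
        else (st.1, st.2 + (st.1 - p.2))) (m, ops))
    = (l.foldl (fun acc ele => if acc < ele then ele else acc) m,
       ops + (k + l.length) * (l.foldl (fun acc ele => if acc < ele then ele else acc) m)
         - k * m - l.sum) := by
  induction l with
  | nil => intro k m ops; simp [PySem.List.enumerate_nil]
  | cons a t ih =>
    intro k m ops
    rw [PySem.List.enumerate_cons, List.foldl_cons]
    by_cases h : m < a
    · simp only [if_pos h, ih, List.foldl_cons, List.sum_cons, List.length_cons]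
      rw [Prod.mk.injEq]
      refine ⟨rfl, by push_cast; ring⟩
    · simp only [if_neg h, ih, List.foldl_cons, List.sum_cons, List.length_cons]
      rw [Prod.mk.injEq]
      refine ⟨rfl, by push_cast; ring⟩

-- ===== VERDICT =====
theorem solve_spec : Claim_equal_solve := by
  intro A _ hpre
  match A with
  | [] => exact absurd rfl hpre
  | a :: t =>
    show solve (a :: t) = solve_alt (a :: t)
    have hget : PySem.List.pyGet? (a :: t) 0 = some a := by
      simp [PySem.List.pyGet?, PySem.List.pyIdx?]
    simp only [solve, solve_alt, hget, pairFold, repairFold]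
    ring
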